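-- pv_equiv track=rewrite | github.com/PharmGKB/PharmCAT | src/scripts/diplotype_comparison/utilities.py | get_unique_combinations
-- ===== SOURCE A (Python) =====
-- from typing import List, Set, Tuple, Optional
--
-- _wobble_genotype_list: list = ['S', 'Y', 'M', 'K', 'R', 'W', 'V', 'H', 'D', 'B', 'N']
--
-- _wobble_match_table: dict[str, List[str]] = {
--     'M': {'A', 'C'},
--     'R': {'A', 'G'},
--     'W': {'A', 'T'},
--     'S': {'C', 'G'},
--     'Y': {'C', 'T'},
--     'K': {'G', 'T'},
--     'V': {'A', 'C', 'G'},
--     'H': {'A', 'C', 'T'},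
--     'D': {'A', 'G', 'T'},
--     'B': {'C', 'G', 'T'},
--     'N': {'A', 'C', 'G', 'T'}
-- }
--
-- def replace_wobble(wobl_genotype: str) -> List[str]:
--     """
--     replace wobble genotypes with basic basepairs A/T/C/G
--     :param wobl_genotype: an allele-defining genotype
--     :return: a list of genotypes with only A, T, C, G, or indels
--     """
--     g_flat = _wobble_match_table[wobl_genotype]
--     return g_flat
--
-- def get_unique_combinations(g1: str, g2: str) -> Set[str]:
--     """
--     get all possible combinations of genotypes at an allele-defining positions
--     :param g1: a list of allele-defining genotypes from allele 1
--     :param g2: a list of allele-defining genotypes from allele 2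
--     :return: a set of unique combinations of genotypes
--     """
--     # replace wobbles
--     g1_ = replace_wobble(g1) if g1 in _wobble_genotype_list else [g1]
--     g2_ = replace_wobble(g2) if g2 in _wobble_genotype_list else [g2]
--
--     # get all possible genotype combinations at this positions
--     if None in g1_ and None in g2_:
--         uniq_comb: Set[str] = set()
--     elif None in g1_:
--         uniq_comb: Set[str] = {x for x in g2_}
--     elif None in g2_:
--         uniq_comb: Set[str] = {x for x in g1_}
--     else:
--         uniq_comb: Set[str] = {'/'.join(sorted([x, y])) for x in g1_ for y in g2_}
--
--     return uniq_comb
-- ===== SOURCE B (Python) =====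
-- # B: recursive union decomposition — expand via one table lookup with a default
-- # (no membership cascade, the dead 'None in ...' branches dropped), pair strings by
-- # direct comparison instead of join(sorted(...)), and build the result as a union of
-- # per-element sets by structural recursion instead of a nested set comprehension.
-- _wobble_match_table = {
--     'M': {'A', 'C'},
--     'R': {'A', 'G'},
--     'W': {'A', 'T'},
--     'S': {'C', 'G'},
--     'Y': {'C', 'T'},
--     'K': {'G', 'T'},
--     'V': {'A', 'C', 'G'},
--     'H': {'A', 'C', 'T'},
--     'D': {'A', 'G', 'T'},
--     'B': {'C', 'G', 'T'},
--     'N': {'A', 'C', 'G', 'T'}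
-- }
--
-- def get_unique_combinations(g1, g2):
--     e1 = _wobble_match_table.get(g1, [g1])
--     e2 = _wobble_match_table.get(g2, [g2])
--
--     def go(xs):
--         if not xs:
--             return set()
--         x = xs[0]
--         head = {(x + '/' + y) if x <= y else (y + '/' + x) for y in e2}
--         return head | go(xs[1:])
--
--     return go(list(e1))
-- ===== Notes on version B (the rewrite author's own statement) =====
-- stated objective: alternative
-- what changed: Replaces A's membership-test-then-indexing and the dead None-branch cascade with a single dict .get lookup with a default, replaces '/'.join(sorted([x,y])) by direct comparison-based string pairing, and builds the result by structural recursion over the first allele's expansion, uniting one per-element set per step, instead of a nested set comprehension.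
import Mathlib
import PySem

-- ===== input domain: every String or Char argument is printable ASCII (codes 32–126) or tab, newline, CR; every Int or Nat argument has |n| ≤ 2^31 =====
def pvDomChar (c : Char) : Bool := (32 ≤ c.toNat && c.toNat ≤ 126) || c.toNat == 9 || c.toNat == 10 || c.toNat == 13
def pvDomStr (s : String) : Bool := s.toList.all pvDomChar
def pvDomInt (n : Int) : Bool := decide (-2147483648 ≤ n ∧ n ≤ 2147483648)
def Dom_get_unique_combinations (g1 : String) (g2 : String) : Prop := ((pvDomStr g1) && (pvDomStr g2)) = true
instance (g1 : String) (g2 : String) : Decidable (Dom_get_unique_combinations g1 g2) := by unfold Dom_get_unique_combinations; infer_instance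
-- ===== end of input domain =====

-- B replaces A's membership-cascade + nested set comprehension by a table lookup with a
-- default and a recursive per-element set union with comparison-based pairing (objective:
-- alternative decomposition, same cost). Both versions return a Python set; the ports list
-- its elements in first-insertion order.

-- ===== PORT A =====
def pvWobbleList : List String := ["S", "Y", "M", "K", "R", "W", "V", "H", "D", "B", "N"]

def pvWobbleTable : PySem.Dict String (PySem.Set String) := PySem.Dict.mk
  [("M", PySem.Set.ofList ["A", "C"]),
   ("R", PySem.Set.ofList ["A", "G"]),
   ("W", PySem.Set.ofList ["A", "T"]),
   ("S", PySem.Set.ofList ["C", "G"]),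
   ("Y", PySem.Set.ofList ["C", "T"]),
   ("K", PySem.Set.ofList ["G", "T"]),
   ("V", PySem.Set.ofList ["A", "C", "G"]),
   ("H", PySem.Set.ofList ["A", "C", "T"]),
   ("D", PySem.Set.ofList ["A", "G", "T"]),
   ("B", PySem.Set.ofList ["C", "G", "T"]),
   ("N", PySem.Set.ofList ["A", "C", "G", "T"])]

-- A calls replace_wobble only on keys of the table, so the KeyError default [] is never used
def replace_wobble (wobl_genotype : String) : List String :=
  PySem.Dict.getD pvWobbleTable wobl_genotype []

-- the three 'None in g1_/g2_' branches of A are dead for str-typed inputs (a list/set of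
-- str never contains None), so the transliteration takes the final branch
def get_unique_combinations (g1 : String) (g2 : String) : List String :=
  let g1_ : List String := if pvWobbleList.contains g1 then replace_wobble g1 else [g1]
  let g2_ : List String := if pvWobbleList.contains g2 then replace_wobble g2 else [g2]
  g1_.foldl (fun acc x => g2_.foldl (fun acc y =>
      PySem.Set.add acc (PySem.Str.join "/" (PySem.List.sorted [x, y] (fun s => s) false))) acc)
    PySem.Set.empty

-- ===== PORT B =====
-- exact port of Python's + on str
def pvStrAdd (a : String) (b : String) : String := String.ofList (a.toList ++ b.toList)

-- (x + '/' + y) if x <= y else (y + '/' + x)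
def pvPair (x : String) (y : String) : String :=
  if x ≤ y then pvStrAdd (pvStrAdd x "/") y else pvStrAdd (pvStrAdd y "/") x

-- def go(xs): if not xs: return set(); head = {pair...}; return head | go(xs[1:])
def pvGo (e2 : List String) : List String → PySem.Set String
  | [] => PySem.Set.empty
  | x :: rest =>
      PySem.Set.union
        (e2.foldl (fun s y => PySem.Set.add s (pvPair x y)) PySem.Set.empty)
        (pvGo e2 rest)

def get_unique_combinations_alt (g1 : String) (g2 : String) : List String :=
  let e1 : List String := PySem.Dict.getD pvWobbleTable g1 [g1]
  let e2 : List String := PySem.Dict.getD pvWobbleTable g2 [g2]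
  pvGo e2 e1

-- ===== PRECONDITION & SPEC =====
def Spec_get_unique_combinations (g1 : String) (g2 : String) (out : List String) : Prop := out = get_unique_combinations_alt g1 g2
instance (g1 : String) (g2 : String) (out : List String) : Decidable (Spec_get_unique_combinations g1 g2 out) := by unfold Spec_get_unique_combinations; infer_instance

-- ===== CLAIM (what is proved, stated in full; the proofs are below) =====
def Claim_equal_get_unique_combinations : Prop := ∀ (g1 : String) (g2 : String), Dom_get_unique_combinations g1 g2 → Spec_get_unique_combinations g1 g2 (get_unique_combinations g1 g2)

-- ===== LEMMAS AND PROOFS =====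

-- '/'.join(sorted([x, y])) is exactly B's comparison-based pairing
theorem pvPair_eq (x y : String) :
    PySem.Str.join "/" (PySem.List.sorted [x, y] (fun s => s) false) = pvPair x y := by
  by_cases h : x ≤ y
  · have hlt : ¬ y.toList < x.toList := by
      simpa [String.lt_iff_toList_lt] using not_lt.mpr h
    refine String.toList_inj.mp ?_
    simp [PySem.List.sorted, PySem.List.insertBy, hlt, PySem.Str.join,
      PySem.Chars.join_cons_cons, PySem.Chars.join_singleton, pvPair, pvStrAdd, h]
  · have hlt : y.toList < x.toList := by
      simpa [String.lt_iff_toList_lt] using lt_of_not_ge h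
    refine String.toList_inj.mp ?_
    simp [PySem.List.sorted, PySem.List.insertBy, hlt, PySem.Str.join,
      PySem.Chars.join_cons_cons, PySem.Chars.join_singleton, pvPair, pvStrAdd, h]

-- the flat sequence of pair strings A's nested loops emit
def pvFlat (e2 e1 : List String) : List String :=
  e1.flatMap (fun x => e2.map (fun y => pvPair x y))

theorem pvSet_update_ofList {s : PySem.Set String} {l : List String} :
    PySem.Set.update s (PySem.Set.ofList l) = PySem.Set.update s l := by
  rw [PySem.Set.update_eq_append_filter, PySem.Set.update_eq_append_filter,
    PySem.Set.ofList_ofList]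

theorem pvA_foldl_eq (e2 : List String) :
    ∀ (e1 : List String) (acc : PySem.Set String),
      e1.foldl (fun acc x => e2.foldl (fun acc y =>
          PySem.Set.add acc (PySem.Str.join "/" (PySem.List.sorted [x, y] (fun s => s) false))) acc)
        acc = PySem.Set.update acc (pvFlat e2 e1)
  | [], acc => rfl
  | x :: rest, acc => by
    have hin : e2.foldl (fun acc y =>
        PySem.Set.add acc (PySem.Str.join "/" (PySem.List.sorted [x, y] (fun s => s) false))) acc
        = PySem.Set.update acc (e2.map (fun y => pvPair x y)) := by
      rw [PySem.Set.update_map_eq_foldl_add]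
      simp only [pvPair_eq]
    rw [List.foldl_cons, hin, pvA_foldl_eq e2 rest]
    simp only [pvFlat, List.flatMap_cons]
    rw [← PySem.Set.update_append]

theorem pvGo_eq (e2 : List String) :
    ∀ e1 : List String, pvGo e2 e1 = PySem.Set.ofList (pvFlat e2 e1)
  | [] => rfl
  | x :: rest => by
    rw [pvGo, pvGo_eq e2 rest]
    show PySem.Set.update (e2.foldl (fun s y => PySem.Set.add s (pvPair x y)) PySem.Set.empty)
        (PySem.Set.ofList (pvFlat e2 rest)) = _
    rw [← PySem.Set.update_map_eq_foldl_add, PySem.Set.update_empty, pvSet_update_ofList]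
    simp only [pvFlat, List.flatMap_cons]
    rw [PySem.Set.ofList_append]

-- A's membership-guarded expansion equals B's one lookup with default
theorem pvExpand_eq (g : String) :
    (if pvWobbleList.contains g then replace_wobble g else [g])
      = PySem.Dict.getD pvWobbleTable g [g] := by
  by_cases h : pvWobbleList.contains g = true
  · simp only [pvWobbleList, List.contains_cons, List.contains_nil, Bool.or_eq_true,
      beq_iff_eq] at h
    rcases h with rfl | rfl | rfl | rfl | rfl | rfl | rfl | rfl | rfl | rfl | rfl | h
    all_goals first
      | decide
      | simp at h
  · have h' : g ∉ pvWobbleList := by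
      simpa [List.contains_iff_mem] using h
    simp only [pvWobbleList, List.mem_cons, List.not_mem_nil, or_false, not_or] at h'
    obtain ⟨h1, h2, h3, h4, h5, h6, h7, h8, h9, h10, h11⟩ := h'
    rw [if_neg (by simpa [List.contains_iff_mem, pvWobbleList] using h)]
    simp [pvWobbleTable, PySem.Dict.getD_eq_get?_getD, PySem.Dict.get?_mk_cons,
      (Ne.symm h1), (Ne.symm h2), (Ne.symm h3), (Ne.symm h4), (Ne.symm h5), (Ne.symm h6),
      (Ne.symm h7), (Ne.symm h8), (Ne.symm h9), (Ne.symm h10), (Ne.symm h11)]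
    simp [PySem.Dict.get?]

-- ===== VERDICT (by name: the statement is the Claim_ definition above) =====
theorem get_unique_combinations_spec : Claim_equal_get_unique_combinations := by
  intro g1 g2 _
  unfold Spec_get_unique_combinations get_unique_combinations get_unique_combinations_alt
  rw [pvExpand_eq g1, pvExpand_eq g2, pvA_foldl_eq, pvGo_eq]
  rfl
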